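-- pv_equiv track=rewrite | github.com/Accelerator87/Skyweaver-Deck-Tracker | create cards library/create library.py | get_html_id
-- ===== SOURCE A (Python) =====
-- def get_html_id(inner):
--
--     start = "data-card-id=\""
--     end = "\""
--     ID = -1
--     for i in range(0,len(inner)):
--         tmpS = inner[i:i+14]
--         if start == tmpS:
--             for j in range(i+14,len(inner)):
--                 tmpE = inner[j]
--                 if end == tmpE:
--                     ID = inner[i+14:j]
--                     return ID
-- ===== SOURCE B (Python) =====
-- def get_html_id(inner):
--     # Cut the string at every '"'. The id is the chunk that follows the first
--     # chunk ending with 'data-card-id=' -- provided a closing quote exists,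
--     # i.e. that following chunk is not the last one.
--     parts = inner.split('"')
--     while len(parts) > 2:
--         if parts[0].endswith('data-card-id='):
--             return parts[1]
--         parts = parts[1:]
--     return None
-- ===== Notes on version B (the rewrite author's own statement) =====
-- stated objective: faster
-- what changed: Instead of sliding a 14-char window over every index (a fresh slice compared at each position) with a nested quote-seeking loop, B splits the string once at every quote and scans the chunk list for the first chunk ending with the attribute name, returning the following chunk (which exists iff a closing quote exists).
import Mathlib
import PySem

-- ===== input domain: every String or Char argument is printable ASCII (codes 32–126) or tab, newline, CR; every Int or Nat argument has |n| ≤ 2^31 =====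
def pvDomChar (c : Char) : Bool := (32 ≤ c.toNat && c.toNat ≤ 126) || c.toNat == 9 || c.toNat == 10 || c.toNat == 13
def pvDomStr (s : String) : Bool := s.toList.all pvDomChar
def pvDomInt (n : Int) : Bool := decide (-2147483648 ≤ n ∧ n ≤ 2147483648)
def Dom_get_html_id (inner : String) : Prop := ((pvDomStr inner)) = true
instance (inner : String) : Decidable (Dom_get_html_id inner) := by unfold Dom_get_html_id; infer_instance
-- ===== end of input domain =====

-- B replaces A's sliding-window marker scan (+ nested quote loop) by one split at every quote
-- followed by a scan of the chunk list for the first chunk ending in the attribute name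
-- (measured faster in a timing run).

-- ===== PORT A =====
def pvStart : List Char := "data-card-id=\"".toList

-- inner loop: for j in range(i+14, len(inner)): if inner[j] == '"': return inner[i+14:j]
def pvInnerA (cs : List Char) (i : Int) : List Int → Option (List Char)
  | [] => none
  | j :: js =>
    if PySem.List.pyGetD cs j ' ' = '"' then
      some (PySem.List.slice cs (some (i + 14)) (some j))
    else pvInnerA cs i js

-- outer loop: for i in range(0, len(inner)): if inner[i:i+14] == start: <inner loop>
def pvOuterA (cs : List Char) : List Int → Option (List Char)
  | [] => none
  | i :: is =>
    if PySem.List.slice cs (some i) (some (i + 14)) = pvStart then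
      match pvInnerA cs i (PySem.List.pyRange (i + 14) cs.length 1) with
      | some r => some r
      | none => pvOuterA cs is
    else pvOuterA cs is

def get_html_id (inner : String) : Option String :=
  (pvOuterA inner.toList (PySem.List.pyRange 0 inner.toList.length 1)).map String.ofList

-- ===== PORT B =====
def pvMarker13 : List Char := "data-card-id=".toList

-- while len(parts) > 2: if parts[0].endswith('data-card-id='): return parts[1]; parts = parts[1:]
def pvScanB : List (List Char) → Option (List Char)
  | a :: b :: c :: rest =>
    if PySem.Chars.endswith a pvMarker13 then some b else pvScanB (b :: c :: rest)
  | _ => none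

def get_html_id_alt (inner : String) : Option String :=
  (pvScanB (PySem.Chars.splitOn inner.toList ['"'])).map String.ofList

-- ===== PRECONDITION & SPEC =====
def Spec_get_html_id (inner : String) (out : Option String) : Prop := out = get_html_id_alt inner
instance (inner : String) (out : Option String) : Decidable (Spec_get_html_id inner out) := by unfold Spec_get_html_id; infer_instance

-- ===== CLAIM (what is proved, stated in full; the proofs are below) =====
def Claim_equal_get_html_id : Prop := ∀ (inner : String), Dom_get_html_id inner → Spec_get_html_id inner (get_html_id inner)

-- ===== LEMMAS AND PROOFS =====

-- proof-side intermediate: 'first marker occurrence, then first quote after it', stated with Chars.find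
def pvF (cs : List Char) : Option (List Char) :=
  let i := PySem.Chars.find cs pvStart
  if i = -1 then none
  else
    let j := PySem.Chars.findFrom cs ['"'] (i + 14) none
    if j = -1 then none
    else some (PySem.List.slice cs (some (i + 14)) (some j))

theorem pv_singleton_prefix (l : List Char) (c : Char) : [c] <+: l ↔ l[0]? = some c := by
  cases l <;> simp [List.cons_prefix_cons, eq_comm]

-- A's outer guard `inner[i:i+14] == start` is exactly "pvStart is a prefix of cs.drop a"
theorem pv_guardA (cs : List Char) (a : Nat) :
    PySem.List.slice cs (some (a : Int)) (some ((a : Int) + 14)) = pvStart ↔ pvStart <+: cs.drop a := by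
  have h14 : (a : Int) + 14 = ((a + 14 : Nat) : Int) := by push_cast; ring
  rw [h14, PySem.List.slice_natCast]
  have : a + 14 - a = 14 := by omega
  rw [this]
  rw [List.prefix_iff_eq_take]
  constructor <;> intro h <;> simpa [eq_comm] using h

theorem pv_len_of_prefix (cs : List Char) (a : Nat) (h : pvStart <+: cs.drop a) : a + 14 ≤ cs.length := by
  have hs : pvStart.length = 14 := by decide
  have := h.length_le
  rw [hs, List.length_drop] at this
  by_cases ha : a ≤ cs.length <;> omega

theorem pv_prefix_getElem? (cs p : List Char) (k i : Nat) (h : p <+: cs.drop k) (hi : i < p.length) :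
    cs[k + i]? = p[i]? := by
  obtain ⟨t, ht⟩ := h
  rw [← List.getElem?_drop, ← ht, List.getElem?_append_left hi]

theorem pv_quote_of_prefix (cs : List Char) (a : Nat) (h : pvStart <+: cs.drop a) :
    cs[a + 13]? = some '"' := by
  have := pv_prefix_getElem? cs pvStart a 13 h (by decide)
  rw [this]; decide

theorem pv_quote_iff (cs : List Char) (a : Nat) (ha : a < cs.length) :
    PySem.List.pyGetD cs (a : Int) ' ' = '"' ↔ cs[a]? = some '"' := by
  simp [PySem.List.pyGetD_natCast, List.getD_eq_getElem?_getD, List.getElem?_eq_getElem ha]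

theorem pv_outerA_none (cs : List Char) :
    ∀ (n a : Nat), cs.length - a ≤ n → (∀ j, a ≤ j → ¬ pvStart <+: cs.drop j) →
      pvOuterA cs (PySem.List.pyRange (a : Int) (cs.length : Int) 1) = none := by
  intro n
  induction n with
  | zero =>
      intro a ha _
      rw [PySem.List.pyRange_one_eq_nil (by exact_mod_cast (by omega : cs.length ≤ a))]
      rfl
  | succ n ih =>
      intro a ha h
      by_cases hL : cs.length ≤ a
      · rw [PySem.List.pyRange_one_eq_nil (by exact_mod_cast hL)]; rfl
      · rw [PySem.List.pyRange_one_cons (by exact_mod_cast (by omega : a < cs.length))]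
        have hg : ¬ PySem.List.slice cs (some (a : Int)) (some ((a : Int) + 14)) = pvStart := by
          rw [pv_guardA]; exact h a le_rfl
        simp only [pvOuterA, if_neg hg]
        have hc : (a : Int) + 1 = ((a + 1 : Nat) : Int) := by push_cast; ring
        rw [hc]
        exact ih (a + 1) (by omega) (fun j hj => h j (by omega))

theorem pv_outerA_skip (cs : List Char) (k : Nat) (hkL : k < cs.length)
    (hk : ∀ i, i < k → ¬ pvStart <+: cs.drop i) :
    ∀ (n a : Nat), k - a ≤ n → a ≤ k →
      pvOuterA cs (PySem.List.pyRange (a : Int) (cs.length : Int) 1) =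
      pvOuterA cs (PySem.List.pyRange (k : Int) (cs.length : Int) 1) := by
  intro n
  induction n with
  | zero =>
      intro a ha hak
      have : a = k := by omega
      rw [this]
  | succ n ih =>
      intro a ha hak
      by_cases hek : a = k
      · rw [hek]
      · have hlt : a < k := by omega
        rw [PySem.List.pyRange_one_cons (by exact_mod_cast (by omega : a < cs.length))]
        have hg : ¬ PySem.List.slice cs (some (a : Int)) (some ((a : Int) + 14)) = pvStart := by
          rw [pv_guardA]; exact hk a hlt
        simp only [pvOuterA, if_neg hg]
        have hc : (a : Int) + 1 = ((a + 1 : Nat) : Int) := by push_cast; ring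
        rw [hc]
        exact ih (a + 1) (by omega) (by omega)

theorem pv_innerA_none (cs : List Char) (i : Int) :
    ∀ (n b : Nat), cs.length - b ≤ n → (∀ j, b ≤ j → j < cs.length → cs[j]? ≠ some '"') →
      pvInnerA cs i (PySem.List.pyRange (b : Int) (cs.length : Int) 1) = none := by
  intro n
  induction n with
  | zero =>
      intro b hb _
      rw [PySem.List.pyRange_one_eq_nil (by exact_mod_cast (by omega : cs.length ≤ b))]
      rfl
  | succ n ih =>
      intro b hb h
      by_cases hL : cs.length ≤ b
      · rw [PySem.List.pyRange_one_eq_nil (by exact_mod_cast hL)]; rfl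
      · rw [PySem.List.pyRange_one_cons (by exact_mod_cast (by omega : b < cs.length))]
        have hg : ¬ PySem.List.pyGetD cs (b : Int) ' ' = '"' := by
          rw [pv_quote_iff cs b (by omega)]; exact h b le_rfl (by omega)
        simp only [pvInnerA, if_neg hg]
        have hc : (b : Int) + 1 = ((b + 1 : Nat) : Int) := by push_cast; ring
        rw [hc]
        exact ih (b + 1) (by omega) (fun j hj => h j (by omega))

theorem pv_innerA_skip (cs : List Char) (i : Int) (b0 q : Nat) (hqL : q < cs.length)
    (hq : ∀ j, b0 ≤ j → j < q → j < cs.length → cs[j]? ≠ some '"') :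
    ∀ (n b : Nat), q - b ≤ n → b0 ≤ b → b ≤ q →
      pvInnerA cs i (PySem.List.pyRange (b : Int) (cs.length : Int) 1) =
      pvInnerA cs i (PySem.List.pyRange (q : Int) (cs.length : Int) 1) := by
  intro n
  induction n with
  | zero =>
      intro b hb hb0 hbq
      have : b = q := by omega
      rw [this]
  | succ n ih =>
      intro b hb hb0 hbq
      by_cases heq : b = q
      · rw [heq]
      · have hlt : b < q := by omega
        rw [PySem.List.pyRange_one_cons (by exact_mod_cast (by omega : b < cs.length))]
        have hg : ¬ PySem.List.pyGetD cs (b : Int) ' ' = '"' := by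
          rw [pv_quote_iff cs b (by omega)]; exact hq b hb0 hlt (by omega)
        simp only [pvInnerA, if_neg hg]
        have hc : (b : Int) + 1 = ((b + 1 : Nat) : Int) := by push_cast; ring
        rw [hc]
        exact ih (b + 1) (by omega) (by omega) (by omega)

-- no prefix occurrence anywhere (the find = -1 case)
theorem pv_no_prefix_of_find_neg (cs : List Char)
    (h : PySem.Chars.find cs pvStart = -1) : ∀ j, ¬ pvStart <+: cs.drop j := by
  rw [PySem.Chars.find_eq_neg_one_iff] at h
  intro j hj
  have hin : PySem.Chars.isIn pvStart cs = true :=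
    (PySem.Chars.exists_prefix_drop_iff_isIn pvStart cs).mp ⟨j, hj⟩
  exact h ((PySem.Chars.isIn_iff_infix pvStart cs).mp hin)

theorem pv_drop_quote (cs : List Char) (j : Nat) (hj : cs[j]? = some '"') :
    ['"'] <+: cs.drop j := by
  rw [pv_singleton_prefix]
  rw [List.getElem?_drop]
  simpa using hj

-- A's loops compute pvF (first marker occurrence via find, then first quote after it)
theorem pvA_eq_pvF (cs : List Char) :
    pvOuterA cs (PySem.List.pyRange 0 cs.length 1) = pvF cs := by
  unfold pvF
  by_cases hF : PySem.Chars.find cs pvStart = -1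
  · rw [hF]
    simp only [reduceIte]
    rw [show (0 : Int) = ((0 : Nat) : Int) by simp]
    rw [pv_outerA_none cs cs.length 0 (by omega) (fun j _ => pv_no_prefix_of_find_neg cs hF j)]
  · have hF0 : 0 ≤ PySem.Chars.find cs pvStart := by
      have := PySem.Chars.neg_one_le_find cs pvStart
      omega
    set k := (PySem.Chars.find cs pvStart).toNat with hkdef
    have hkF : PySem.Chars.find cs pvStart = (k : Int) := by omega
    obtain ⟨hpre, hmin⟩ := PySem.Chars.find_spec hF0
    have hk14 : k + 14 ≤ cs.length := pv_len_of_prefix cs k hpre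
    rw [hkF]
    rw [show (0 : Int) = ((0 : Nat) : Int) by simp]
    rw [pv_outerA_skip cs k (by omega) (fun i hi => hmin i hi) cs.length 0 (by omega) (by omega)]
    rw [PySem.List.pyRange_one_cons (by exact_mod_cast (by omega : k < cs.length))]
    simp only [pvOuterA, if_pos ((pv_guardA cs k).mpr hpre)]
    have hc14 : (k : Int) + 14 = ((k + 14 : Nat) : Int) := by push_cast; ring
    rw [hc14]
    have hff := PySem.Chars.findFrom_natCast cs ['"'] (k + 14) (by omega)
    rw [hff]
    have hneg : ¬ ((k : Int) = -1) := by omega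
    rw [if_neg hneg]
    by_cases hG : PySem.Chars.find (cs.drop (k + 14)) ['"'] = -1
    · -- no closing quote anywhere after the match: both sides are none
      rw [hG]
      simp only [reduceIte]
      have hnoq : ∀ j, k + 14 ≤ j → j < cs.length → cs[j]? ≠ some '"' := by
        intro j hj1 hj2 hq
        have h1 : ['"'] <+: cs.drop j := pv_drop_quote cs j hq
        have h2 : cs.drop j = (cs.drop (k + 14)).drop (j - (k + 14)) := by
          rw [List.drop_drop]; congr 1; omega
        rw [h2] at h1
        have hin : PySem.Chars.isIn ['"'] (cs.drop (k + 14)) = true :=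
          (PySem.Chars.exists_prefix_drop_iff_isIn ['"'] (cs.drop (k + 14))).mp ⟨_, h1⟩
        rw [PySem.Chars.find_eq_neg_one_iff] at hG
        exact hG ((PySem.Chars.isIn_iff_infix ['"'] (cs.drop (k + 14))).mp hin)
      rw [pv_innerA_none cs (k : Int) cs.length (k + 14) (by omega)
        (fun j h1 h2 => hnoq j h1 h2)]
      rw [show (k : Int) + 1 = ((k + 1 : Nat) : Int) by push_cast; ring]
      rw [pv_outerA_none cs cs.length (k + 1) (by omega) ?_]
      intro j hj hpj
      have hq := pv_quote_of_prefix cs j hpj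
      have hlen := pv_len_of_prefix cs j hpj
      exact hnoq (j + 13) (by omega) (by omega) hq
    · -- a closing quote exists: both sides return the slice up to the first quote
      have hG0 : 0 ≤ PySem.Chars.find (cs.drop (k + 14)) ['"'] := by
        have := PySem.Chars.neg_one_le_find (cs.drop (k + 14)) ['"']
        omega
      set t := (PySem.Chars.find (cs.drop (k + 14)) ['"']).toNat with htdef
      have htF : PySem.Chars.find (cs.drop (k + 14)) ['"'] = (t : Int) := by omega
      obtain ⟨hpre2, hmin2⟩ := PySem.Chars.find_spec hG0
      rw [htF] at hpre2 hmin2 ⊢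
      rw [Int.toNat_natCast] at hpre2 hmin2
      simp only [if_neg (show ¬((t : Int) = -1) by omega)]
      rw [if_neg (show ¬(((k + 14 : Nat) : Int) + (t : Int) = -1) by push_cast; omega)]
      have hdd : (cs.drop (k + 14)).drop t = cs.drop (k + 14 + t) := by
        rw [List.drop_drop]
      rw [hdd] at hpre2
      have hqL : k + 14 + t < cs.length := by
        have := hpre2.length_le
        simp [List.length_drop] at this
        by_cases h : k + 14 + t ≤ cs.length <;> omega
      have hqQ : cs[k + 14 + t]? = some '"' := by
        have := (pv_singleton_prefix (cs.drop (k + 14 + t)) '"').mp hpre2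
        rw [List.getElem?_drop] at this
        simpa using this
      have hnoq2 : ∀ j, k + 14 ≤ j → j < k + 14 + t → j < cs.length → cs[j]? ≠ some '"' := by
        intro j hjlo hj1 hj2 hq
        have h1 : ['"'] <+: cs.drop j := pv_drop_quote cs j hq
        have h2 : cs.drop j = (cs.drop (k + 14)).drop (j - (k + 14)) := by
          rw [List.drop_drop]; congr 1; omega
        rw [h2] at h1
        exact hmin2 (j - (k + 14)) (by omega) h1
      rw [pv_innerA_skip cs (k : Int) (k + 14) (k + 14 + t) hqL hnoq2 cs.length (k + 14) (by omega) (by omega) (by omega)]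
      rw [PySem.List.pyRange_one_cons (by exact_mod_cast hqL)]
      simp only [pvInnerA, if_pos ((pv_quote_iff cs (k + 14 + t) hqL).mpr hqQ)]
      rw [hc14]
      have : ((k + 14 : Nat) : Int) + (t : Int) = ((k + 14 + t : Nat) : Int) := by push_cast; ring
      rw [this]

-- ---------- splitOn structure ----------

theorem pv_start_eq : pvStart = pvMarker13 ++ ['"'] := by decide

theorem pv_drop_m1 (pre rest : List Char) : (pre ++ '"' :: rest).drop (pre.length + 1) = rest := by
  rw [show pre ++ '"' :: rest = (pre ++ ['"']) ++ rest by simp]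
  rw [show pre.length + 1 = (pre ++ ['"']).length by simp]
  exact List.drop_left

theorem pv_go_acc : ∀ (fuel : Nat) (l cur : List Char) (acc : List (List Char)),
    PySem.Chars.splitOn.go ['"'] fuel l cur acc =
      acc.reverse ++ PySem.Chars.splitOn.go ['"'] fuel l cur [] := by
  intro fuel
  induction fuel with
  | zero => intro l cur acc; simp [PySem.Chars.splitOn.go]
  | succ f ih =>
      intro l cur acc
      cases l with
      | nil => simp [PySem.Chars.splitOn.go]
      | cons c rest =>
          simp only [PySem.Chars.splitOn.go]
          by_cases hp : (['"'] : List Char).isPrefixOf (c :: rest) = true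
          · rw [if_pos hp, if_pos hp, ih _ _ (cur.reverse :: acc), ih _ _ [cur.reverse]]
            simp
          · rw [if_neg hp, if_neg hp]
            exact ih rest (c :: cur) acc

theorem pv_go_noquote : ∀ (l : List Char), '"' ∉ l →
    ∀ (fuel : Nat) (cur : List Char) (acc : List (List Char)), l.length ≤ fuel →
    PySem.Chars.splitOn.go ['"'] fuel l cur acc = acc.reverse ++ [cur.reverse ++ l] := by
  intro l
  induction l with
  | nil => intro _ fuel cur acc _; cases fuel <;> simp [PySem.Chars.splitOn.go]
  | cons c rest ih =>
      intro h fuel cur acc hf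
      have hc : c ≠ '"' := fun he => h (by simp [he])
      cases fuel with
      | zero => simp at hf
      | succ f =>
          have hp : ¬ ((['"'] : List Char).isPrefixOf (c :: rest) = true) := by
            simp [List.isPrefixOf, Ne.symm hc]
          simp only [PySem.Chars.splitOn.go, if_neg hp]
          rw [ih (fun hm => h (by simp [hm])) f (c :: cur) acc (by simp at hf; omega)]
          simp

theorem pv_go_quote : ∀ (pre : List Char), '"' ∉ pre →
    ∀ (fuel : Nat) (rest cur : List Char) (acc : List (List Char)), pre.length < fuel →
    PySem.Chars.splitOn.go ['"'] fuel (pre ++ '"' :: rest) cur acc =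
      PySem.Chars.splitOn.go ['"'] (fuel - (pre.length + 1)) rest [] ((cur.reverse ++ pre) :: acc) := by
  intro pre
  induction pre with
  | nil =>
      intro _ fuel rest cur acc hf
      cases fuel with
      | zero => simp at hf
      | succ f =>
          have hp : (['"'] : List Char).isPrefixOf ('"' :: rest) = true := by
            simp [List.isPrefixOf]
          simp only [List.nil_append, PySem.Chars.splitOn.go, if_pos hp]
          simp
  | cons c pre' ih =>
      intro h fuel rest cur acc hf
      have hc : c ≠ '"' := fun he => h (by simp [he])
      cases fuel with
      | zero => simp at hf
      | succ f =>
          have hp : ¬ ((['"'] : List Char).isPrefixOf (c :: (pre' ++ '"' :: rest)) = true) := by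
            simp [List.isPrefixOf, Ne.symm hc]
          simp only [List.cons_append, PySem.Chars.splitOn.go, if_neg hp]
          rw [ih (fun hm => h (by simp [hm])) f rest (c :: cur) acc (by simp at hf ⊢; omega)]
          have h1 : (c :: cur).reverse ++ pre' = cur.reverse ++ c :: pre' := by simp
          have h2 : f - (pre'.length + 1) = (f + 1) - ((c :: pre').length + 1) := by simp
          rw [h1, h2]

theorem pv_splitOn_noquote (l : List Char) (h : '"' ∉ l) :
    PySem.Chars.splitOn l ['"'] = [l] := by
  unfold PySem.Chars.splitOn
  rw [pv_go_noquote l h (l.length + 1) [] [] (by omega)]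
  simp

theorem pv_splitOn_quote (pre rest : List Char) (h : '"' ∉ pre) :
    PySem.Chars.splitOn (pre ++ '"' :: rest) ['"'] = pre :: PySem.Chars.splitOn rest ['"'] := by
  unfold PySem.Chars.splitOn
  rw [pv_go_quote pre h ((pre ++ '"' :: rest).length + 1) rest [] [] (by simp)]
  have hfl : (pre ++ '"' :: rest).length + 1 - (pre.length + 1) = rest.length + 1 := by simp
  rw [hfl, pv_go_acc]
  simp

theorem pv_go_ne_nil : ∀ (fuel : Nat) (l cur : List Char) (acc : List (List Char)),
    PySem.Chars.splitOn.go ['"'] fuel l cur acc ≠ [] := by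
  intro fuel
  induction fuel with
  | zero => intro l cur acc; simp [PySem.Chars.splitOn.go]
  | succ f ih =>
      intro l cur acc
      cases l with
      | nil => simp [PySem.Chars.splitOn.go]
      | cons c rest =>
          simp only [PySem.Chars.splitOn.go]
          by_cases hp : (['"'] : List Char).isPrefixOf (c :: rest) = true
          · rw [if_pos hp]; exact ih _ _ _
          · rw [if_neg hp]; exact ih _ _ _

theorem pv_splitOn_ne_nil (l : List Char) : PySem.Chars.splitOn l ['"'] ≠ [] :=
  pv_go_ne_nil _ _ _ _

theorem pv_first_quote (l : List Char) (h : '"' ∈ l) :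
    ∃ pre rest, l = pre ++ '"' :: rest ∧ '"' ∉ pre := by
  induction l with
  | nil => simp at h
  | cons c rest ih =>
      by_cases hc : c = '"'
      · exact ⟨[], rest, by simp [hc], by simp⟩
      · have hmem : '"' ∈ rest := by
          rcases List.mem_cons.mp h with h1 | h1
          · exact absurd h1.symm hc
          · exact h1
        obtain ⟨p, r, hpr, hnp⟩ := ih hmem
        refine ⟨c :: p, r, by simp [hpr], ?_⟩
        intro hm
        rcases List.mem_cons.mp hm with h1 | h1
        · exact hc h1.symm
        · exact hnp h1

-- find points at k when k is an occurrence and nothing earlier is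
theorem pv_find_eq (cs sub : List Char) (k : Nat) (hk : sub <+: cs.drop k)
    (hmin : ∀ i, i < k → ¬ sub <+: cs.drop i) : PySem.Chars.find cs sub = (k : Int) := by
  have hinf : sub <:+: cs := by
    obtain ⟨t, ht⟩ := hk
    exact ⟨cs.take k, t, by rw [List.append_assoc, ht]; exact List.take_append_drop k cs⟩
  have h0 : 0 ≤ PySem.Chars.find cs sub := (PySem.Chars.find_nonneg_iff cs sub).mpr hinf
  obtain ⟨hp, hm⟩ := PySem.Chars.find_spec h0
  have h1 : ¬ ((PySem.Chars.find cs sub).toNat < k) := fun hlt => hmin _ hlt hp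
  have h2 : ¬ (k < (PySem.Chars.find cs sub).toNat) := fun hlt => hm k hlt hk
  omega

theorem pv_mem_of_getElem? (l : List Char) (i : Nat) (c : Char) (h : l[i]? = some c) : c ∈ l := by
  obtain ⟨hlt, he⟩ := List.getElem?_eq_some_iff.mp h
  exact he ▸ List.getElem_mem hlt

-- any marker occurrence in pre ++ '"'::rest lies strictly inside rest when pre
-- has no quote and does not end with the 13-char marker prefix
theorem pv_occ_shift (pre rest : List Char) (hp : '"' ∉ pre) (hne : ¬ pvMarker13 <:+ pre)
    (k : Nat) (hk : pvStart <+: (pre ++ '"' :: rest).drop k) : pre.length + 1 ≤ k := by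
  by_contra hlt
  have hkm : k ≤ pre.length := by omega
  have hq13 : (pre ++ '"' :: rest)[k + 13]? = some '"' := pv_quote_of_prefix _ k hk
  by_cases h1 : k + 13 < pre.length
  · have he : (pre ++ '"' :: rest)[k + 13]? = pre[k + 13]? := List.getElem?_append_left h1
    exact hp (pv_mem_of_getElem? pre (k + 13) '"' (he ▸ hq13))
  by_cases h2 : k + 13 = pre.length
  · apply hne
    obtain ⟨t, ht⟩ := hk
    refine ⟨(pre ++ '"' :: rest).take k, ?_⟩
    have e1 : pre = (pre ++ '"' :: rest).take (k + 13) := by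
      rw [h2]
      exact List.take_left.symm
    conv_rhs => rw [e1]
    rw [show k + 13 = k + 13 from rfl, List.take_add]
    congr 1
    rw [← ht, List.take_append_of_le_length (by decide)]
    decide
  · have h3 := pv_prefix_getElem? (pre ++ '"' :: rest) pvStart k (pre.length - k) hk
      (by rw [show pvStart.length = 14 by decide]; omega)
    rw [show k + (pre.length - k) = pre.length by omega] at h3
    have hqm : (pre ++ '"' :: rest)[pre.length]? = some '"' := by
      rw [List.getElem?_append_right (le_refl _)]
      simp
    rw [hqm] at h3
    rw [pv_start_eq, List.getElem?_append_left
      (by rw [show pvMarker13.length = 13 by decide]; omega)] at h3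
    exact absurd (pv_mem_of_getElem? pvMarker13 _ '"' h3.symm) (by decide)

theorem pvF_noquote (cs : List Char) (h : '"' ∉ cs) : pvF cs = none := by
  have hF : PySem.Chars.find cs pvStart = -1 := by
    rw [PySem.Chars.find_eq_neg_one_iff]
    intro hinf
    exact h (hinf.sublist.subset (by decide))
  simp only [pvF, hF]
  simp

-- shifting past a non-matching first chunk does not change pvF
theorem pvF_shift (pre rest : List Char) (hp : '"' ∉ pre) (hne : ¬ pvMarker13 <:+ pre) :
    pvF (pre ++ '"' :: rest) = pvF rest := by
  have hdrop1 : (pre ++ '"' :: rest).drop (pre.length + 1) = rest := pv_drop_m1 pre rest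
  have hdrop : ∀ x : Nat, (pre ++ '"' :: rest).drop (pre.length + 1 + x) = rest.drop x := by
    intro x
    have h2 := congrArg (List.drop x) hdrop1
    rwa [List.drop_drop] at h2
  by_cases hFr : PySem.Chars.find rest pvStart = -1
  · have hFc : PySem.Chars.find (pre ++ '"' :: rest) pvStart = -1 := by
      rw [PySem.Chars.find_eq_neg_one_iff]
      intro hinf
      have hin : PySem.Chars.isIn pvStart (pre ++ '"' :: rest) = true :=
        (PySem.Chars.isIn_iff_infix _ _).mpr hinf
      obtain ⟨j, hj⟩ := (PySem.Chars.exists_prefix_drop_iff_isIn _ _).mpr hin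
      have hge := pv_occ_shift pre rest hp hne j hj
      have hj' : pvStart <+: rest.drop (j - (pre.length + 1)) := by
        have hx := hdrop (j - (pre.length + 1))
        rw [show pre.length + 1 + (j - (pre.length + 1)) = j by omega] at hx
        rwa [hx] at hj
      exact pv_no_prefix_of_find_neg rest hFr _ hj'
    simp only [pvF, hFc, hFr]
    simp
  · have h0 : 0 ≤ PySem.Chars.find rest pvStart := by
      have := PySem.Chars.neg_one_le_find rest pvStart
      omega
    obtain ⟨kr, hFr'⟩ : ∃ k : Nat, PySem.Chars.find rest pvStart = (k : Int) :=
      ⟨(PySem.Chars.find rest pvStart).toNat, by omega⟩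
    obtain ⟨hpr, hmr⟩ := PySem.Chars.find_spec h0
    rw [hFr', Int.toNat_natCast] at hpr hmr
    have hkr14 : kr + 14 ≤ rest.length := pv_len_of_prefix rest kr hpr
    have hFc : PySem.Chars.find (pre ++ '"' :: rest) pvStart = ((pre.length + 1 + kr : Nat) : Int) := by
      apply pv_find_eq
      · rw [hdrop kr]; exact hpr
      · intro i hi hocc
        have hge := pv_occ_shift pre rest hp hne i hocc
        have hx := hdrop (i - (pre.length + 1))
        rw [show pre.length + 1 + (i - (pre.length + 1)) = i by omega] at hx
        rw [hx] at hocc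
        exact hmr (i - (pre.length + 1)) (by omega) hocc
    have hc1 : ¬ ((pre.length + 1 + kr : Nat) : Int) = -1 := by
      have : (0 : Int) ≤ ((pre.length + 1 + kr : Nat) : Int) := Int.natCast_nonneg _
      omega
    have hc2 : ¬ ((kr : Nat) : Int) = -1 := by
      have : (0 : Int) ≤ ((kr : Nat) : Int) := Int.natCast_nonneg _
      omega
    simp only [pvF, hFc, hFr']
    rw [if_neg hc1, if_neg hc2]
    rw [show ((pre.length + 1 + kr : Nat) : Int) + 14 = ((pre.length + 1 + kr + 14 : Nat) : Int) by push_cast; ring]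
    rw [show ((kr : Nat) : Int) + 14 = ((kr + 14 : Nat) : Int) by push_cast; ring]
    rw [PySem.Chars.findFrom_natCast (pre ++ '"' :: rest) ['"'] (pre.length + 1 + kr + 14)
      (by simp only [List.length_append, List.length_cons]; omega)]
    rw [PySem.Chars.findFrom_natCast rest ['"'] (kr + 14) hkr14]
    rw [show pre.length + 1 + kr + 14 = pre.length + 1 + (kr + 14) by omega, hdrop (kr + 14)]
    by_cases hd : PySem.Chars.find (rest.drop (kr + 14)) ['"'] = -1
    · rw [hd]; simp
    · have hd0 : 0 ≤ PySem.Chars.find (rest.drop (kr + 14)) ['"'] := by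
        have := PySem.Chars.neg_one_le_find (rest.drop (kr + 14)) ['"']
        omega
      obtain ⟨f, hfd⟩ : ∃ k : Nat, PySem.Chars.find (rest.drop (kr + 14)) ['"'] = (k : Int) :=
        ⟨(PySem.Chars.find (rest.drop (kr + 14)) ['"']).toNat, by omega⟩
      rw [hfd]
      have hne1 : ¬ ((f : Nat) : Int) = -1 := by omega
      rw [if_neg hne1, if_neg hne1]
      rw [if_neg (by push_cast; omega : ¬ ((pre.length + 1 + (kr + 14) : Nat) : Int) + (f : Int) = -1)]
      rw [if_neg (by push_cast; omega : ¬ ((kr + 14 : Nat) : Int) + (f : Int) = -1)]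
      congr 1
      rw [show ((pre.length + 1 + (kr + 14) : Nat) : Int) + (f : Int) = ((pre.length + 1 + (kr + 14) + f : Nat) : Int) by push_cast; ring]
      rw [show ((kr + 14 : Nat) : Int) + (f : Int) = ((kr + 14 + f : Nat) : Int) by push_cast; ring]
      rw [PySem.List.slice_natCast, PySem.List.slice_natCast]
      rw [show pre.length + 1 + (kr + 14) + f - (pre.length + 1 + (kr + 14)) = f by omega]
      rw [show kr + 14 + f - (kr + 14) = f by omega]
      rw [hdrop (kr + 14)]

theorem pv_scanB_cons (a : List Char) (parts : List (List Char))
    (h : ¬ PySem.Chars.endswith a pvMarker13 = true) :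
    pvScanB (a :: parts) = pvScanB parts := by
  cases parts with
  | nil => rfl
  | cons b t =>
      cases t with
      | nil => rfl
      | cons c r => simp only [pvScanB, if_neg h]

theorem pv_key : ∀ (n : Nat) (cs : List Char), cs.length ≤ n →
    pvF cs = pvScanB (PySem.Chars.splitOn cs ['"']) := by
  intro n
  induction n with
  | zero =>
      intro cs h
      have hnil : cs = [] := List.eq_nil_of_length_eq_zero (Nat.le_zero.mp h)
      subst hnil
      rw [pv_splitOn_noquote _ (by simp), pvF_noquote _ (by simp)]
      rfl
  | succ n ih =>
      intro cs hlen
      by_cases hq : '"' ∈ cs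
      · obtain ⟨pre, rest, hdec, hp⟩ := pv_first_quote cs hq
        subst hdec
        rw [pv_splitOn_quote pre rest hp]
        by_cases hend : pvMarker13 <:+ pre
        · -- pre ends with 'data-card-id=': the id is the next chunk (if a closing quote exists)
          obtain ⟨p0, hp0⟩ := hend
          have hm13 : pre.length = p0.length + 13 := by
            rw [← hp0]; simp [pvMarker13]
          have hdropk : (pre ++ '"' :: rest).drop p0.length = pvStart ++ rest := by
            rw [← hp0, List.append_assoc, List.drop_left, pv_start_eq]
            simp
          have hocc : pvStart <+: (pre ++ '"' :: rest).drop p0.length := by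
            rw [hdropk]; exact ⟨rest, rfl⟩
          have hmin : ∀ i, i < p0.length → ¬ pvStart <+: (pre ++ '"' :: rest).drop i := by
            intro i hi hocc'
            have hq13 := pv_quote_of_prefix _ i hocc'
            have he : (pre ++ '"' :: rest)[i + 13]? = pre[i + 13]? :=
              List.getElem?_append_left (by omega)
            exact hp (pv_mem_of_getElem? pre (i + 13) '"' (he ▸ hq13))
          have hFc : PySem.Chars.find (pre ++ '"' :: rest) pvStart = ((p0.length : Nat) : Int) :=
            pv_find_eq _ _ _ hocc hmin
          have hdrop1 : (pre ++ '"' :: rest).drop (pre.length + 1) = rest := pv_drop_m1 pre rest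
          simp only [pvF, hFc]
          rw [if_neg (by omega : ¬ ((p0.length : Nat) : Int) = -1)]
          rw [show ((p0.length : Nat) : Int) + 14 = ((pre.length + 1 : Nat) : Int) by
            rw [hm13]; push_cast; ring]
          rw [PySem.Chars.findFrom_natCast _ _ _ (by simp), hdrop1]
          by_cases hqr : '"' ∈ rest
          · obtain ⟨mid, tail, hmt, hpm⟩ := pv_first_quote rest hqr
            subst hmt
            have hfr : PySem.Chars.find (mid ++ '"' :: tail) ['"'] = (mid.length : Int) := by
              apply pv_find_eq
              · rw [List.drop_left]; exact ⟨tail, rfl⟩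
              · intro i hi hpf
                have hgi : (mid ++ '"' :: tail)[i]? = some '"' := by
                  have := (pv_singleton_prefix _ '"').mp hpf
                  rwa [List.getElem?_drop] at this
                rw [List.getElem?_append_left hi] at hgi
                exact hpm (pv_mem_of_getElem? mid i '"' hgi)
            rw [hfr]
            rw [if_neg (by omega : ¬ (mid.length : Int) = -1)]
            rw [if_neg (by push_cast; omega : ¬ ((pre.length + 1 : Nat) : Int) + (mid.length : Int) = -1)]
            rw [pv_splitOn_quote mid tail hpm]
            obtain ⟨t, ts, hts⟩ := List.exists_cons_of_ne_nil (pv_splitOn_ne_nil tail)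
            rw [hts]
            simp only [pvScanB]
            rw [if_pos (by rw [PySem.Chars.endswith_iff]; exact ⟨p0, hp0⟩)]
            congr 1
            rw [show ((pre.length + 1 : Nat) : Int) + (mid.length : Int) = ((pre.length + 1 + mid.length : Nat) : Int) by push_cast; ring]
            rw [PySem.List.slice_natCast]
            rw [show pre.length + 1 + mid.length - (pre.length + 1) = mid.length by omega]
            rw [pv_drop_m1]
            exact List.take_left
          · have hfr : PySem.Chars.find rest ['"'] = -1 := by
              rw [PySem.Chars.find_eq_neg_one_iff]
              intro hinf
              exact hqr (hinf.sublist.subset (by simp))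
            rw [hfr]
            rw [pv_splitOn_noquote rest hqr]
            simp [pvScanB]
        · -- pre does not end with the marker prefix: drop the first chunk on both sides
          rw [pvF_shift pre rest hp hend]
          rw [pv_scanB_cons pre _ (by rw [PySem.Chars.endswith_iff]; exact hend)]
          exact ih rest (by simp at hlen; omega)
      · rw [pv_splitOn_noquote cs hq, pvF_noquote cs hq]
        rfl

-- ===== VERDICT (by name: the statement is the Claim_ definition above) =====
theorem get_html_id_spec : Claim_equal_get_html_id := by
  intro inner _
  unfold Spec_get_html_id get_html_id get_html_id_alt
  rw [pvA_eq_pvF, pv_key inner.toList.length inner.toList (le_refl _)]
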